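-- pv_equiv track=rewrite | github.com/JohnNixon6972/Language-and-Computation | POS - Tagging/helper_functions.py | calculate_freq_accuracy
-- ===== SOURCE A (Python) =====
-- from collections import defaultdict
--
-- def calculate_freq_accuracy(predicted_tags, actual_tags):
--     freq_accuracy = defaultdict(lambda: {'correct': 0, 'incorrect': 0})
--     for i in range(len(predicted_tags)):
--         if predicted_tags[i] == actual_tags[i]:
--             freq_accuracy[actual_tags[i]]['correct'] += 1
--         else:
--             freq_accuracy[actual_tags[i]]['incorrect'] += 1
--
--     return freq_accuracy
-- ===== SOURCE B (Python) =====
-- from collections import defaultdict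
--
-- def calculate_freq_accuracy(predicted_tags, actual_tags):
--     # Pass 1: tally totals and correct predictions per tag.
--     total = {}
--     correct = {}
--     for i in range(len(predicted_tags)):
--         tag = actual_tags[i]
--         total[tag] = total.get(tag, 0) + 1
--         if predicted_tags[i] == tag:
--             correct[tag] = correct.get(tag, 0) + 1
--     # Pass 2: combine the tallies into the result dict.
--     freq_accuracy = defaultdict(lambda: {'correct': 0, 'incorrect': 0})
--     for tag, tot in total.items():
--         c = correct.get(tag, 0)
--         freq_accuracy[tag] = {'correct': c, 'incorrect': tot - c}
--     return freq_accuracy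
-- ===== Notes on version B (the rewrite author's own statement) =====
-- stated objective: alternative
-- what changed: Replaced A's single branch-and-increment pass over a defaultdict of nested dicts by a build-tables-then-combine shape: one pass tallies total and correct counts per tag into two flat dicts, then a second loop over the totals constructs each {'correct','incorrect'} entry with incorrect = total - correct.
import Mathlib
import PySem

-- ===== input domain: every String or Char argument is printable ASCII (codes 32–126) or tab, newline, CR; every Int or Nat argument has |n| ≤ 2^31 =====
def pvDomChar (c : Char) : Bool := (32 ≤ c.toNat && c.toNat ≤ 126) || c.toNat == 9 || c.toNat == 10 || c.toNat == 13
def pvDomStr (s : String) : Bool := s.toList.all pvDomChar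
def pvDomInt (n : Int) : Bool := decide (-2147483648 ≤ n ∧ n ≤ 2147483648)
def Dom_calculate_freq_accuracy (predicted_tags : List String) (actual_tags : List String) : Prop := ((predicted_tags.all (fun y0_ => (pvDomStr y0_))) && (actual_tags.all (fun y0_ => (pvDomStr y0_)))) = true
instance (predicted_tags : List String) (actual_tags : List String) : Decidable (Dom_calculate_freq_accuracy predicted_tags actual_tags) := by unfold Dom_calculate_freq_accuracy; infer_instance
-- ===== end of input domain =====

-- B replaces A's single branch-and-increment pass over a defaultdict of nested dicts by a
-- build-tables-then-combine shape: tally total and correct counts per tag, then combine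
-- (alternative decomposition, same asymptotic cost).

-- shared literal: the inner {'correct': c, 'incorrect': i} dict
def pvInner (c i : Int) : PySem.Dict String Int :=
  PySem.Dict.ofList [("correct", c), ("incorrect", i)]

-- ===== PORT A =====
def calculate_freq_accuracy (predicted_tags : List String) (actual_tags : List String) : List (String × List (String × Int)) :=
  let fa := (PySem.List.pyRange 0 (predicted_tags.length : Int) 1).foldl
    (fun (d : PySem.Dict String (PySem.Dict String Int)) i =>
      if PySem.List.pyGetD predicted_tags i "" == PySem.List.pyGetD actual_tags i "" then
        d.insert (PySem.List.pyGetD actual_tags i "")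
          ((d.getD (PySem.List.pyGetD actual_tags i "") (pvInner 0 0)).modify "correct" 0 (· + 1))
      else
        d.insert (PySem.List.pyGetD actual_tags i "")
          ((d.getD (PySem.List.pyGetD actual_tags i "") (pvInner 0 0)).modify "incorrect" 0 (· + 1)))
    PySem.Dict.empty
  fa.items.map (fun p => (p.1, p.2.items))

-- ===== PORT B =====
def calculate_freq_accuracy_alt (predicted_tags : List String) (actual_tags : List String) : List (String × List (String × Int)) :=
  let tc := (PySem.List.pyRange 0 (predicted_tags.length : Int) 1).foldl
    (fun (tc : PySem.Dict String Int × PySem.Dict String Int) i =>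
      let tag := PySem.List.pyGetD actual_tags i ""
      let total := tc.1.insert tag (tc.1.getD tag 0 + 1)
      let correct := if PySem.List.pyGetD predicted_tags i "" == tag then
          tc.2.insert tag (tc.2.getD tag 0 + 1) else tc.2
      (total, correct))
    (PySem.Dict.empty, PySem.Dict.empty)
  let fa := tc.1.items.foldl
    (fun (d : PySem.Dict String (PySem.Dict String Int)) p =>
      let c := tc.2.getD p.1 0
      d.insert p.1 (pvInner c (p.2 - c)))
    PySem.Dict.empty
  fa.items.map (fun p => (p.1, p.2.items))

-- ===== PRECONDITION & SPEC =====
-- Pre_ excludes exactly the inputs on which Python A raises IndexError: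
-- actual_tags shorter than predicted_tags (actual_tags[i] out of range).
def Pre_calculate_freq_accuracy (predicted_tags : List String) (actual_tags : List String) : Prop :=
  predicted_tags.length ≤ actual_tags.length
instance (predicted_tags : List String) (actual_tags : List String) : Decidable (Pre_calculate_freq_accuracy predicted_tags actual_tags) := by unfold Pre_calculate_freq_accuracy; infer_instance

def pvWitness_calculate_freq_accuracy : List String × List String := (["NN", "VB"], ["NN", "DT"])

def Spec_calculate_freq_accuracy (predicted_tags : List String) (actual_tags : List String) (out : List (String × List (String × Int))) : Prop := out = calculate_freq_accuracy_alt predicted_tags actual_tags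
instance (predicted_tags : List String) (actual_tags : List String) (out : List (String × List (String × Int))) : Decidable (Spec_calculate_freq_accuracy predicted_tags actual_tags out) := by unfold Spec_calculate_freq_accuracy; infer_instance

-- ===== CLAIM (what is proved, stated in full; the proofs are below) =====
def Claim_equal_calculate_freq_accuracy : Prop := ∀ (predicted_tags : List String) (actual_tags : List String), Dom_calculate_freq_accuracy predicted_tags actual_tags → Pre_calculate_freq_accuracy predicted_tags actual_tags → Spec_calculate_freq_accuracy predicted_tags actual_tags (calculate_freq_accuracy predicted_tags actual_tags)

-- ===== LEMMAS AND PROOFS =====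

-- abstract version of A's loop body over an explicit (predicted, actual) pair
def pvStepA (d : PySem.Dict String (PySem.Dict String Int)) (pa : String × String) :
    PySem.Dict String (PySem.Dict String Int) :=
  if pa.1 == pa.2 then
    d.insert pa.2 ((d.getD pa.2 (pvInner 0 0)).modify "correct" 0 (· + 1))
  else
    d.insert pa.2 ((d.getD pa.2 (pvInner 0 0)).modify "incorrect" 0 (· + 1))

def pvCcnt (ps : List (String × String)) (k : String) : Int :=
  (ps.countP (fun pa => pa.1 == pa.2 && pa.2 == k) : Int)

def pvIcnt (ps : List (String × String)) (k : String) : Int :=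
  (ps.countP (fun pa => !(pa.1 == pa.2) && pa.2 == k) : Int)

theorem pvInner_modify_correct (c i : Int) :
    (pvInner c i).modify "correct" 0 (· + 1) = pvInner (c + 1) i := rfl

theorem pvInner_modify_incorrect (c i : Int) :
    (pvInner c i).modify "incorrect" 0 (· + 1) = pvInner c (i + 1) := rfl

theorem pvStepA_getD (ps : List (String × String)) (k : String) :
    ∀ (d : PySem.Dict String (PySem.Dict String Int)) (c i : Int),
      d.getD k (pvInner 0 0) = pvInner c i →
      (ps.foldl pvStepA d).getD k (pvInner 0 0) = pvInner (c + pvCcnt ps k) (i + pvIcnt ps k) := by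
  induction ps with
  | nil => intro d c i h; simp [pvCcnt, pvIcnt, h]
  | cons pa ps ih =>
    intro d c i h
    simp only [List.foldl_cons]
    by_cases hk : pa.2 = k
    · subst hk
      by_cases he : pa.1 == pa.2
      · have hnew : (pvStepA d pa).getD pa.2 (pvInner 0 0) = pvInner (c + 1) i := by
          simp [pvStepA, he, PySem.Dict.getD_insert_self, h, pvInner_modify_correct]
        rw [ih _ _ _ hnew]
        simp [pvCcnt, pvIcnt, he]
        congr 1; omega
      · have hnew : (pvStepA d pa).getD pa.2 (pvInner 0 0) = pvInner c (i + 1) := by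
          simp [pvStepA, he, PySem.Dict.getD_insert_self, h, pvInner_modify_incorrect]
        rw [ih _ _ _ hnew]
        simp [pvCcnt, pvIcnt, he]
        congr 1; omega
    · have hnew : (pvStepA d pa).getD k (pvInner 0 0) = pvInner c i := by
        unfold pvStepA
        split <;> rw [PySem.Dict.getD_insert_of_ne _ _ _ (Ne.symm hk)] <;> exact h
      rw [ih _ _ _ hnew]
      simp [pvCcnt, pvIcnt, hk]

theorem pvStepA_eq_insert :
    pvStepA = fun d pa => d.insert pa.2
      (if pa.1 == pa.2 then (d.getD pa.2 (pvInner 0 0)).modify "correct" 0 (· + 1)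
       else (d.getD pa.2 (pvInner 0 0)).modify "incorrect" 0 (· + 1)) := by
  funext d pa
  unfold pvStepA
  by_cases h : pa.1 == pa.2 <;> simp [h]

theorem pvProd_foldl {α β γ : Type} (f : α → γ → α) (g : β → γ → β) (l : List γ) :
    ∀ (a : α) (b : β),
      l.foldl (fun tc x => (f tc.1 x, g tc.2 x)) (a, b) = (l.foldl f a, l.foldl g b) := by
  induction l with
  | nil => intro a b; rfl
  | cons x xs ih => intro a b; simp [List.foldl_cons, ih]

theorem pvFoldl_filter {α β : Type} (g : α → β → α) (p : β → Bool) (l : List β) :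
    ∀ (a : α), l.foldl (fun acc x => if p x then g acc x else acc) a = (l.filter p).foldl g a := by
  induction l with
  | nil => intro a; rfl
  | cons x xs ih => intro a; by_cases h : p x <;> simp [h, ih]

theorem pvCount_split (ps : List (String × String)) (k : String) :
    (ps.map (·.2)).count k = ps.countP (fun pa => pa.1 == pa.2 && pa.2 == k)
      + ps.countP (fun pa => !(pa.1 == pa.2) && pa.2 == k) := by
  induction ps with
  | nil => rfl
  | cons p ps ih =>
    simp only [List.map_cons, List.count_cons, List.countP_cons, ih]
    by_cases h : p.1 == p.2 <;> by_cases h2 : p.2 == k <;> simp [h, h2] <;> omega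

-- the main abstract equivalence between A's one-pass dict and B's combine-of-counters
theorem pvMain (ps : List (String × String)) :
    ((ps.foldl pvStepA PySem.Dict.empty).items.map (fun p => (p.1, p.2.items)))
    = ((PySem.Dict.counter (ps.map (·.2))).items.foldl
        (fun (d : PySem.Dict String (PySem.Dict String Int)) p =>
          d.insert p.1 (pvInner ((PySem.Dict.counter ((ps.filter (fun pa => pa.1 == pa.2)).map (·.2))).getD p.1 0)
            (p.2 - (PySem.Dict.counter ((ps.filter (fun pa => pa.1 == pa.2)).map (·.2))).getD p.1 0)))
        PySem.Dict.empty).items.map (fun p => (p.1, p.2.items)) := by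
  set A := ps.foldl pvStepA PySem.Dict.empty with hA
  have hkeys : A.keys = PySem.Set.ofList (ps.map (·.2)) := by
    rw [hA, pvStepA_eq_insert, PySem.Dict.keys_foldl_insert_key]
    simp [PySem.Set.update_nil_left]
  have hnd : A.keys.Nodup := by rw [hkeys]; exact PySem.Set.nodup_ofList _
  have hAitems : A.items = A.keys.map (fun k => (k, A.getD k (pvInner 0 0))) :=
    PySem.Dict.items_eq_map_keys A hnd (pvInner 0 0)
  have hAget : ∀ k, A.getD k (pvInner 0 0) = pvInner (pvCcnt ps k) (pvIcnt ps k) := by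
    intro k
    have := pvStepA_getD ps k PySem.Dict.empty 0 0 (by simp)
    simpa using this
  have hBitems : ((PySem.Dict.counter (ps.map (·.2))).items.foldl
        (fun (d : PySem.Dict String (PySem.Dict String Int)) p =>
          d.insert p.1 (pvInner ((PySem.Dict.counter ((ps.filter (fun pa => pa.1 == pa.2)).map (·.2))).getD p.1 0)
            (p.2 - (PySem.Dict.counter ((ps.filter (fun pa => pa.1 == pa.2)).map (·.2))).getD p.1 0)))
        PySem.Dict.empty).items
      = (PySem.Dict.counter (ps.map (·.2))).items.map
          (fun p => (p.1, pvInner ((PySem.Dict.counter ((ps.filter (fun pa => pa.1 == pa.2)).map (·.2))).getD p.1 0)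
            (p.2 - (PySem.Dict.counter ((ps.filter (fun pa => pa.1 == pa.2)).map (·.2))).getD p.1 0))) := by
    rw [PySem.Dict.items_foldl_insert_fresh]
    · simp [PySem.Dict.empty]
    · intro a _; exact PySem.Dict.contains_empty _
    · exact PySem.Dict.nodup_keys_counter _
  rw [hAitems, hkeys, hBitems, PySem.Dict.items_counter, List.map_map, List.map_map, List.map_map]
  apply List.map_congr_left
  intro k _
  have hc : (PySem.Dict.counter ((ps.filter (fun pa => pa.1 == pa.2)).map (·.2))).getD k 0 = pvCcnt ps k := by
    rw [PySem.Dict.getD_counter]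
    simp only [pvCcnt, List.count_eq_countP, List.countP_map, List.countP_filter]
    congr 1
    apply List.countP_congr
    intro pa _
    simp [Function.comp, Bool.and_comm]
  have ht : ((ps.map (·.2)).count k : Int) = pvCcnt ps k + pvIcnt ps k := by
    simp only [pvCcnt, pvIcnt]
    exact_mod_cast congrArg (Nat.cast : Nat → Int) (pvCount_split ps k)
  simp only [hAget, hc, Function.comp]
  rw [ht]
  have : pvCcnt ps k + pvIcnt ps k - pvCcnt ps k = pvIcnt ps k := by ring
  rw [this]

-- B's pair fold computes the two counters
theorem pvBfold (ps : List (String × String)) :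
    ps.foldl (fun (tc : PySem.Dict String Int × PySem.Dict String Int) pa =>
        (tc.1.insert pa.2 (tc.1.getD pa.2 0 + 1),
         if pa.1 == pa.2 then tc.2.insert pa.2 (tc.2.getD pa.2 0 + 1) else tc.2))
      (PySem.Dict.empty, PySem.Dict.empty)
    = (PySem.Dict.counter (ps.map (·.2)),
       PySem.Dict.counter ((ps.filter (fun pa => pa.1 == pa.2)).map (·.2))) := by
  rw [pvProd_foldl (fun (t : PySem.Dict String Int) (pa : String × String) => t.insert pa.2 (t.getD pa.2 0 + 1))
        (fun (c : PySem.Dict String Int) (pa : String × String) =>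
          if pa.1 == pa.2 then c.insert pa.2 (c.getD pa.2 0 + 1) else c)]
  congr 1
  · rw [← PySem.Dict.foldl_insert_getD_add_one_eq_counter, List.foldl_map]
  · rw [← PySem.Dict.foldl_insert_getD_add_one_eq_counter, List.foldl_map, ← pvFoldl_filter]

-- ===== VERDICT (by name: the statement is the Claim_ definition above) =====
theorem calculate_freq_accuracy_spec : Claim_equal_calculate_freq_accuracy := by
  intro predicted_tags actual_tags _ _
  unfold Spec_calculate_freq_accuracy calculate_freq_accuracy calculate_freq_accuracy_alt
  set zs := (PySem.List.pyRange 0 (predicted_tags.length : Int) 1).map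
    (fun i => (PySem.List.pyGetD predicted_tags i "", PySem.List.pyGetD actual_tags i "")) with hzs
  have ha : (PySem.List.pyRange 0 (predicted_tags.length : Int) 1).foldl
      (fun (d : PySem.Dict String (PySem.Dict String Int)) i =>
        if PySem.List.pyGetD predicted_tags i "" == PySem.List.pyGetD actual_tags i "" then
          d.insert (PySem.List.pyGetD actual_tags i "")
            ((d.getD (PySem.List.pyGetD actual_tags i "") (pvInner 0 0)).modify "correct" 0 (· + 1))
        else
          d.insert (PySem.List.pyGetD actual_tags i "")
            ((d.getD (PySem.List.pyGetD actual_tags i "") (pvInner 0 0)).modify "incorrect" 0 (· + 1)))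
      PySem.Dict.empty
      = zs.foldl pvStepA PySem.Dict.empty := by
    rw [hzs, List.foldl_map]
    rfl
  have hb : (PySem.List.pyRange 0 (predicted_tags.length : Int) 1).foldl
      (fun (tc : PySem.Dict String Int × PySem.Dict String Int) i =>
        let tag := PySem.List.pyGetD actual_tags i ""
        let total := tc.1.insert tag (tc.1.getD tag 0 + 1)
        let correct := if PySem.List.pyGetD predicted_tags i "" == tag then
            tc.2.insert tag (tc.2.getD tag 0 + 1) else tc.2
        (total, correct))
      (PySem.Dict.empty, PySem.Dict.empty)
      = (PySem.Dict.counter (zs.map (·.2)),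
         PySem.Dict.counter ((zs.filter (fun pa => pa.1 == pa.2)).map (·.2))) := by
    rw [hzs, ← pvBfold, List.foldl_map]
  simp only [ha, hb]
  exact pvMain zs
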